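-- pv_equiv track=rewrite | github.com/yongsun-yoon/python-algorithms | programmers/135808.py | solution
-- ===== SOURCE A (Python) =====
-- def solution(k, m, score):
--     answer = 0
--
--     score = sorted(score, reverse=True)
--     for i in range(0, len(score), m):
--         box = score[i:i+m]
--         if len(box) < m:
--             break
--         answer += box[-1] * m
--
--     return answer
-- ===== SOURCE B (Python) =====
-- def solution(k, m, score):
--     cnt = {}
--     for x in score:
--         cnt[x] = cnt.get(x, 0) + 1
--     total = 0
--     pos = 0
--     for v in sorted(cnt, reverse=True):
--         c = cnt[v]
--         total += v * m * ((pos + c) // m - pos // m)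
--         pos += c
--     return total
-- ===== Notes on version B (the rewrite author's own statement) =====
-- stated objective: alternative
-- what changed: B never slices the sorted list into boxes: it builds a frequency dictionary, iterates the distinct score values in descending order once, and for each value computes arithmetically how many box-minimum positions fall in its run via (pos+c)//m - pos//m, accumulating v*m times that count.
-- outside the precondition, e.g. on solution(0, -2, [1, 2]): A returns 0, B returns 4; on solution(0, 0, [1, 2]): A raises ValueError, B raises ZeroDivisionError
import Mathlib
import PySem

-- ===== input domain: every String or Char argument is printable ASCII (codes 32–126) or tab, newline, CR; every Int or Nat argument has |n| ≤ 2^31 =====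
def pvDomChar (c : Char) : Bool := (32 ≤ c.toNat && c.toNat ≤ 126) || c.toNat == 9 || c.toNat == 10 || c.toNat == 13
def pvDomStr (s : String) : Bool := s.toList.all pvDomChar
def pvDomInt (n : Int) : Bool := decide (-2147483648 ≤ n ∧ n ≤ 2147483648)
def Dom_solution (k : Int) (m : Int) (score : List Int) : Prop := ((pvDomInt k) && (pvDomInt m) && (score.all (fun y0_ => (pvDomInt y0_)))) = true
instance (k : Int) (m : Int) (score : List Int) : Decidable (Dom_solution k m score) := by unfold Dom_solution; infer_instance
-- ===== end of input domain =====

-- B replaces A's sort-and-slice-into-boxes loop by a frequency dictionary: iterate the distinct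
-- values in descending order once and count each value's box-minimum positions arithmetically.
-- ===== PORT A =====
-- loop body of A: skip once broken; slice the box, break (flag) if short, else add box[-1]*m
def solAStep (s : List Int) (m : Int) (st : Int × Bool) (i : Int) : Int × Bool :=
  if st.2 then st
  else
    let box := PySem.List.slice s (some i) (some (i + m))
    if (box.length : Int) < m then (st.1, true)
    else (st.1 + (PySem.List.pyGet? box (-1)).getD 0 * m, st.2)

def solution (k : Int) (m : Int) (score : List Int) : Int :=
  let s := PySem.List.sorted score (fun x => x) true
  ((PySem.List.pyRange 0 (PySem.List.len s) m).foldl (solAStep s m) (0, false)).1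

-- ===== PORT B =====
-- cnt[x] = cnt.get(x, 0) + 1 loop
def solBCnt (score : List Int) : PySem.Dict Int Int :=
  score.foldl (fun d x => d.insert x (d.getD x 0 + 1)) PySem.Dict.empty

-- loop body of B: c = cnt[v]; total += v * m * ((pos + c) // m - pos // m); pos += c
def solBStep (cnt : PySem.Dict Int Int) (m : Int) (st : Int × Int) (v : Int) : Int × Int :=
  let c := cnt.getD v 0
  (st.1 + v * m * (PySem.Int.floordiv (st.2 + c) m - PySem.Int.floordiv st.2 m), st.2 + c)

def solution_alt (k : Int) (m : Int) (score : List Int) : Int :=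
  let cnt := solBCnt score
  ((PySem.List.sorted cnt.keys (fun x => x) true).foldl (solBStep cnt m) (0, 0)).1

-- ===== PRECONDITION & SPEC =====
-- Pre_ restricts to a positive box size m ≥ 1, the task's natural domain: at m = 0 both programs
-- raise (A: ValueError from range step 0, B: ZeroDivisionError); for m < 0 A happens to return 0
-- (its range is empty) while B's floor-division box count is meaningless — excluded, see cites.
def Pre_solution (k : Int) (m : Int) (score : List Int) : Prop := 1 ≤ m
instance (k : Int) (m : Int) (score : List Int) : Decidable (Pre_solution k m score) := by unfold Pre_solution; infer_instance

def pvWitness_solution : Int × Int × List Int := (0, 3, [1, 2, 3, 1])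

def Spec_solution (k : Int) (m : Int) (score : List Int) (out : Int) : Prop := out = solution_alt k m score
instance (k : Int) (m : Int) (score : List Int) (out : Int) : Decidable (Spec_solution k m score out) := by unfold Spec_solution; infer_instance

-- ===== CLAIM (what is proved, stated in full; the proofs are below) =====
def Claim_equal_solution : Prop := ∀ (k : Int) (m : Int) (score : List Int), Dom_solution k m score → Pre_solution k m score → Spec_solution k m score (solution k m score)

-- ===== LEMMAS AND PROOFS =====

-- the common reference value: m * (sum of s[j] over positions j with m ∣ j+1), one element at a time
def strideSum (m : Int) : Int → List Int → Int
  | _,   []      => 0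
  | pos, x :: xs => (if (pos + 1) % m = 0 then x * m else 0) + strideSum m (pos + 1) xs

theorem strideSum_append (m : Int) (u w : List Int) : ∀ pos : Int,
    strideSum m pos (u ++ w) = strideSum m pos u + strideSum m (pos + u.length) w := by
  induction u with
  | nil => intro pos; simp [strideSum]
  | cons x xs ih =>
    intro pos
    simp only [List.cons_append, strideSum, ih (pos + 1), List.length_cons]
    push_cast
    ring_nf

theorem strideSum_zero (m : Int) : ∀ (u : List Int) (pos : Int),
    (∀ p : Int, pos < p → p ≤ pos + u.length → ¬ (p % m = 0)) → strideSum m pos u = 0 := by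
  intro u
  induction u with
  | nil => intro pos _; rfl
  | cons x xs ih =>
    intro pos h
    have h1 : ¬ ((pos + 1) % m = 0) :=
      h (pos + 1) (by omega) (by push_cast [List.length_cons]; omega)
    have h2 := ih (pos + 1) (fun p hp1 hp2 =>
      h p (by omega) (by push_cast [List.length_cons] at hp2 ⊢; omega))
    simp only [strideSum, if_neg h1, h2, add_zero]

theorem strideSum_short (m : Int) (hm : 1 ≤ m) (u : List Int) (pos : Int) (ha : m ∣ pos)
    (hlen : (u.length : Int) < m) : strideSum m pos u = 0 := by
  apply strideSum_zero
  intro p h1 h2 hp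
  have hd : m ∣ p := Int.dvd_of_emod_eq_zero hp
  have : m ∣ p - pos := Dvd.dvd.sub hd ha
  have := Int.le_of_dvd (by omega) this
  omega

theorem strideSum_singleton (m pos x : Int) :
    strideSum m pos [x] = if (pos + 1) % m = 0 then x * m else 0 := by
  simp [strideSum]

theorem strideSum_full (m : Int) (hm : 1 ≤ m) (u : List Int) (pos : Int) (ha : m ∣ pos)
    (hlen : (u.length : Int) = m) (hne : u ≠ []) :
    strideSum m pos u = u.getLast hne * m := by
  have hd : u.dropLast ++ [u.getLast hne] = u := List.dropLast_append_getLast hne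
  conv_lhs => rw [← hd]
  rw [strideSum_append, strideSum_short m hm _ pos ha (by simp [List.length_dropLast]; omega),
    strideSum_singleton]
  have hlen' : (u.dropLast.length : Int) = m - 1 := by simp [List.length_dropLast]; omega
  rw [hlen']
  rw [if_pos (by rw [show pos + (m - 1) + 1 = pos + m from by ring]; exact Int.emod_eq_zero_of_dvd (by exact Dvd.dvd.add ha ⟨1, by ring⟩))]
  ring

-- (a+1)/m in terms of a/m (floor division, 0 < m)
theorem ediv_succ (m : Int) (hm : 0 < m) (a : Int) :
    (a + 1) / m = a / m + (if (a + 1) % m = 0 then 1 else 0) := by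
  obtain ⟨q, r, hqr, hr0, hr1⟩ : ∃ q r, a = r + q * m ∧ 0 ≤ r ∧ r < m :=
    ⟨a / m, a % m, (Int.emod_add_ediv_mul a m).symm,
      Int.emod_nonneg a (by omega), Int.emod_lt_of_pos a hm⟩
  subst hqr
  have hdiv : (r + q * m) / m = q := by
    rw [Int.add_mul_ediv_right _ _ (by omega : m ≠ 0), Int.ediv_eq_zero_of_lt hr0 hr1]
    omega
  by_cases hcase : r = m - 1
  · have h1 : r + q * m + 1 = (q + 1) * m := by rw [hcase]; ring
    rw [hdiv, h1, Int.mul_ediv_cancel _ (by omega : m ≠ 0), Int.mul_emod_left, if_pos rfl]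
  · have h1 : r + q * m + 1 = (r + 1) + q * m := by ring
    rw [hdiv, h1, Int.add_mul_ediv_right _ _ (by omega : m ≠ 0),
      Int.ediv_eq_zero_of_lt (by omega) (by omega), Int.add_mul_emod_self_right _ _ _,
      if_neg (by rw [Int.emod_eq_of_lt (by omega) (by omega)]; omega)]
    omega

theorem strideSum_replicate (m v : Int) (hm : 1 ≤ m) : ∀ (c : Nat) (pos : Int),
    strideSum m pos (List.replicate c v) = v * m * ((pos + c) / m - pos / m) := by
  intro c
  induction c with
  | zero => intro pos; simp [strideSum]
  | succ c ih =>
    intro pos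
    rw [List.replicate_succ]
    simp only [strideSum, ih (pos + 1)]
    have hc : (pos + ((c : Int) + 1)) = (pos + 1) + c := by ring
    push_cast
    rw [hc, ediv_succ m (by omega) pos]
    split_ifs <;> ring

-- B's fold over the distinct values equals strideSum over the expanded runs
theorem foldB_eq (cnt : PySem.Dict Int Int) (m : Int) (score : List Int) (hm : 1 ≤ m)
    (hcnt : ∀ v : Int, cnt.getD v 0 = (score.count v : Int)) :
    ∀ (vs : List Int) (total pos : Int),
    (vs.foldl (solBStep cnt m) (total, pos)).1
      = total + strideSum m pos (vs.flatMap (fun v => List.replicate (score.count v) v)) := by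
  intro vs
  induction vs with
  | nil => intro total pos; simp [strideSum]
  | cons v vs ih =>
    intro total pos
    rw [List.foldl_cons, List.flatMap_cons, strideSum_append]
    have hstep : solBStep cnt m (total, pos) v
        = (total + v * m * ((pos + (score.count v : Int)) / m - pos / m), pos + (score.count v : Int)) := by
      simp only [solBStep, hcnt v,
        PySem.Int.floordiv_eq_ediv_of_pos (by omega : (0:Int) < m)]
    rw [hstep, ih, strideSum_replicate m v hm]
    simp only [List.length_replicate]
    ring

-- count of x in the expanded runs of a duplicate-free value list
theorem count_flatMap_replicate (f : Int → Nat) : ∀ (ks : List Int), ks.Nodup → ∀ x : Int,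
    (ks.flatMap (fun v => List.replicate (f v) v)).count x = if x ∈ ks then f x else 0 := by
  intro ks
  induction ks with
  | nil => intro _ x; simp
  | cons v vs ih =>
    intro hnd x
    rw [List.nodup_cons] at hnd
    rw [List.flatMap_cons, List.count_append, List.count_replicate, ih hnd.2 x]
    by_cases hxv : x = v
    · subst hxv
      simp [hnd.1]
    · simp [hxv, Ne.symm hxv]

-- runs expanded from a strictly descending value list are descending
theorem pairwise_flatMap_replicate (f : Int → Nat) : ∀ (ks : List Int),
    ks.Pairwise (fun a b => b < a) →
    (ks.flatMap (fun v => List.replicate (f v) v)).Pairwise (fun a b : Int => b ≤ a) := by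
  intro ks
  induction ks with
  | nil => intro _; simp
  | cons v vs ih =>
    intro hpw
    rw [List.pairwise_cons] at hpw
    rw [List.flatMap_cons, List.pairwise_append]
    refine ⟨?_, ih hpw.2, ?_⟩
    · apply List.pairwise_replicate.mpr
      simp
    · intro x hx y hy
      have hxv : x = v := List.eq_of_mem_replicate hx
      obtain ⟨w, hw, hyw⟩ := List.mem_flatMap.mp hy
      have hyw' : y = w := List.eq_of_mem_replicate hyw
      have := hpw.1 w hw
      omega

-- sorting descending = expanding the runs of the distinct values sorted descending
theorem sorted_decomp (score : List Int) :
    PySem.List.sorted score (fun x => x) true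
      = (PySem.List.sorted (PySem.Set.ofList score) (fun x => x) true).flatMap
          (fun v => List.replicate (score.count v) v) := by
  have hksperm : (PySem.List.sorted (PySem.Set.ofList score) (fun x => x) true).Perm
      (PySem.Set.ofList score) := PySem.List.sorted_perm ..
  have hknd : (PySem.List.sorted (PySem.Set.ofList score) (fun x => x) true).Nodup :=
    hksperm.nodup_iff.mpr (PySem.Set.nodup_ofList score)
  have hkpw : (PySem.List.sorted (PySem.Set.ofList score) (fun x => x) true).Pairwise
      (fun a b => b < a) := by
    have h1 := PySem.List.sorted_pairwise_rev (xs := PySem.Set.ofList score) (key := fun x => x)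
    exact (h1.and hknd).imp (fun {a b} h => lt_of_le_of_ne h.1 (fun e => h.2 e.symm))
  have hperm2 : ((PySem.List.sorted (PySem.Set.ofList score) (fun x => x) true).flatMap
      (fun v => List.replicate (score.count v) v)).Perm score := by
    apply List.perm_iff_count.mpr
    intro x
    rw [count_flatMap_replicate (fun v => score.count v) _ hknd x]
    by_cases hx : x ∈ score
    · rw [if_pos (by rw [PySem.List.mem_sorted, PySem.Set.mem_ofList]; exact hx)]
    · rw [if_neg (by rw [PySem.List.mem_sorted, PySem.Set.mem_ofList]; exact hx),
        (List.count_eq_zero).mpr hx]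
  exact ((PySem.List.sorted_perm ..).trans hperm2.symm).eq_of_pairwise
    (fun a b _ _ h1 h2 => le_antisymm h2 h1)
    (by simpa using PySem.List.sorted_pairwise_rev score (fun x : Int => x))
    (pairwise_flatMap_replicate (fun v => score.count v) _ hkpw)

-- once the break flag is set, A's fold never changes state
theorem solAStep_broken (s : List Int) (m : Int) (l : List Int) (acc : Int) :
    l.foldl (solAStep s m) (acc, true) = (acc, true) := by
  induction l with
  | nil => rfl
  | cons x xs ih => simpa [solAStep] using ih

-- pyRange with a positive step, empty and cons forms
theorem pyRange_pos_nil {m : Int} (a b : Int) (hm : 0 < m) (h : b ≤ a) :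
    PySem.List.pyRange a b m = [] := by
  rw [PySem.List.pyRange_of_pos a b hm]
  simp [show ¬ a < b by omega]

theorem pyRange_pos_cons {m : Int} (a b : Int) (hm : 0 < m) (h : a < b) :
    PySem.List.pyRange a b m = a :: PySem.List.pyRange (a + m) b m := by
  rw [PySem.List.pyRange_of_pos a b hm, PySem.List.pyRange_of_pos (a + m) b hm]
  have hcount : (if a < b then ((b - a + m - 1) / m).toNat else 0)
      = (if a + m < b then ((b - (a + m) + m - 1) / m).toNat else 0) + 1 := by
    rw [if_pos h]
    by_cases h2 : a + m < b
    · rw [if_pos h2]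
      have e : b - a + m - 1 = (b - (a + m) + m - 1) + 1 * m := by ring
      rw [e, Int.add_mul_ediv_right _ _ (by omega : m ≠ 0)]
      have hnn : 0 ≤ (b - (a + m) + m - 1) / m := Int.ediv_nonneg (by omega) (by omega)
      omega
    · rw [if_neg h2]
      have e : b - a + m - 1 = (b - a - 1) + 1 * m := by ring
      rw [e, Int.add_mul_ediv_right _ _ (by omega : m ≠ 0)]
      rw [Int.ediv_eq_zero_of_lt (by omega) (by omega)]
      decide
  rw [hcount, List.range_succ_eq_map]
  simp only [List.map_cons, List.map_map]
  congr 1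
  · simp
  · apply List.map_congr_left
    intro k _
    simp [Function.comp]
    ring

-- A's break-loop from a box-start index a accumulates strideSum of the tail
theorem loop_eq (s : List Int) (m : Int) (hm : 1 ≤ m) :
    ∀ (N : Nat) (a acc : Int), 0 ≤ a → m ∣ a → ((s.length : Int) - a).toNat ≤ N →
      ((PySem.List.pyRange a (PySem.List.len s) m).foldl (solAStep s m) (acc, false)).1
        = acc + strideSum m a (s.drop a.toNat) := by
  intro N
  induction N with
  | zero =>
    intro a acc ha hdvd hN
    rw [PySem.List.len_eq, pyRange_pos_nil a _ (by omega) (by omega),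
      List.drop_eq_nil_of_le (by omega : s.length ≤ a.toNat)]
    simp [strideSum]
  | succ N ih =>
    intro a acc ha hdvd hN
    by_cases hlt : a < (s.length : Int)
    · rw [PySem.List.len_eq, pyRange_pos_cons a _ (by omega) hlt, List.foldl_cons]
      by_cases hfull : a + m ≤ (s.length : Int)
      · -- full box: A adds box[-1]*m = s[a+m-1]*m; strideSum contributes the same chunk
        have hbox : PySem.List.slice s (some a) (some (a + m))
            = (s.drop a.toNat).take ((a + m).toNat - a.toNat) :=
          PySem.List.slice_toNat s ha (by omega)
        have hlen : ((s.drop a.toNat).take ((a + m).toNat - a.toNat)).length = m.toNat := by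
          simp [List.length_take, List.length_drop]; omega
        have hstep : solAStep s m (acc, false) a
            = (acc + (PySem.List.pyGet? s (a + m - 1)).getD 0 * m, false) := by
          simp only [solAStep, hbox]
          rw [if_neg (by simp)]
          rw [if_neg (by rw [hlen]; omega)]
          have hidx : (PySem.List.pyGet? ((s.drop a.toNat).take ((a + m).toNat - a.toNat)) (-1))
              = PySem.List.pyGet? s (a + m - 1) := by
            rw [PySem.List.pyGet?_neg_one, PySem.List.pyGet?_of_nonneg _ (by omega)]
            rw [List.getLast?_eq_getElem?]
            rw [List.getElem?_take, hlen]
            rw [if_pos (by omega), List.getElem?_drop]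
            congr 1
            omega
          rw [hidx]
        have hu : (s.drop a.toNat).take m.toNat ++ s.drop (a + m).toNat = s.drop a.toNat := by
          have hdd : s.drop (a + m).toNat = (s.drop a.toNat).drop m.toNat := by
            rw [List.drop_drop]
            congr 1
            omega
          rw [hdd, List.take_append_drop]
        have hul : ((((s.drop a.toNat).take m.toNat)).length : Int) = m := by
          simp [List.length_take, List.length_drop]; omega
        have hne : (s.drop a.toNat).take m.toNat ≠ [] := by
          intro h0
          rw [h0] at hul
          simp at hul
          omega
        have hgl : ((s.drop a.toNat).take m.toNat).getLast hne
            = (PySem.List.pyGet? s (a + m - 1)).getD 0 := by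
          rw [PySem.List.pyGet?_of_nonneg _ (by omega),
            List.getElem?_eq_getElem (by omega : (a + m - 1).toNat < s.length)]
          rw [List.getLast_eq_getElem]
          simp only [List.getElem_take, List.getElem_drop, Option.getD_some]
          congr 1
          simp [List.length_take, List.length_drop]
          omega
        have hchunk : strideSum m a (s.drop a.toNat)
            = (PySem.List.pyGet? s (a + m - 1)).getD 0 * m
              + strideSum m (a + m) (s.drop (a + m).toNat) := by
          conv_lhs => rw [← hu]
          rw [strideSum_append, hul, strideSum_full m hm _ a hdvd hul hne, hgl]
        have hrec := ih (a + m) (acc + (PySem.List.pyGet? s (a + m - 1)).getD 0 * m)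
          (by omega) (Dvd.dvd.add hdvd (dvd_refl m)) (by omega)
        rw [PySem.List.len_eq] at hrec
        rw [hstep, hrec, hchunk]
        ring
      · -- short box: A breaks with acc; the remaining tail holds no box-minimum position
        have hbox : PySem.List.slice s (some a) (some (a + m))
            = (s.drop a.toNat).take ((a + m).toNat - a.toNat) :=
          PySem.List.slice_toNat s ha (by omega)
        have hlen : ((s.drop a.toNat).take ((a + m).toNat - a.toNat)).length = s.length - a.toNat := by
          simp [List.length_take, List.length_drop]; omega
        have hstep : solAStep s m (acc, false) a = (acc, true) := by
          simp only [solAStep, hbox]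
          rw [if_neg (by simp)]
          rw [if_pos (by rw [hlen]; omega)]
        rw [hstep, solAStep_broken,
          strideSum_short m hm _ a hdvd (by simp [List.length_drop]; omega)]
        simp
    · rw [PySem.List.len_eq, pyRange_pos_nil a _ (by omega) (by omega),
        List.drop_eq_nil_of_le (by omega : s.length ≤ a.toNat)]
      simp [strideSum]

-- ===== VERDICT (by name: the statement is the Claim_ definition above) =====
theorem solution_spec : Claim_equal_solution := by
  intro k m score _ hpre
  unfold Spec_solution solution solution_alt Pre_solution at *
  dsimp only
  have hcntr : solBCnt score = PySem.Dict.counter score :=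
    PySem.Dict.foldl_insert_getD_add_one_eq_counter score
  have hA := loop_eq (PySem.List.sorted score (fun x => x) true) m hpre
    ((PySem.List.sorted score (fun x => x) true).length) 0 0 le_rfl ⟨0, by ring⟩ (by simp)
  rw [hA]
  rw [hcntr, PySem.Dict.keys_counter,
    foldB_eq (PySem.Dict.counter score) m score hpre (fun v => PySem.Dict.getD_counter score v)]
  simp only [Int.toNat_zero, List.drop_zero]
  rw [sorted_decomp]
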